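-- pv_equiv track=rewrite | github.com/k-harada/AtCoder | ABC/ABC101-150/ABC113/C.py | solve
-- ===== SOURCE A (Python) =====
-- def solve(n, m, py_list):
--     pyi_list = [(py[0], py[1], i) for i, py in enumerate(py_list)]
--     pyi_list_s = sorted(pyi_list, key=lambda x: (x[0], x[1]))
--     c = [0] * (n + 1)
--     res = ["0"] * m
--     for p, y, i in pyi_list_s:
--         c[p] += 1
--         r = str(1000000 + p)[1:] + str(1000000 + c[p])[1:]
--         res[i] = r
--     return res
-- ===== SOURCE B (Python) =====
-- def solve(n, m, py_list):
--     res = ["0"] * m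
--     for i, (p, y) in enumerate(py_list):
--         seq = 0
--         for j, (q, z) in enumerate(py_list):
--             if q == p and (z < y or (z == y and j <= i)):
--                 seq += 1
--         res[i] = str(1000000 + p)[1:] + str(1000000 + seq)[1:]
--     return res
-- ===== Notes on version B (the rewrite author's own statement) =====
-- stated objective: alternative
-- what changed: B eliminates the global (p,y) stable sort and the per-prefecture counter array: each city's sequence number is computed directly as the count of same-prefecture cities with a lexicographically earlier (year, original index) pair.
import Mathlib
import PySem

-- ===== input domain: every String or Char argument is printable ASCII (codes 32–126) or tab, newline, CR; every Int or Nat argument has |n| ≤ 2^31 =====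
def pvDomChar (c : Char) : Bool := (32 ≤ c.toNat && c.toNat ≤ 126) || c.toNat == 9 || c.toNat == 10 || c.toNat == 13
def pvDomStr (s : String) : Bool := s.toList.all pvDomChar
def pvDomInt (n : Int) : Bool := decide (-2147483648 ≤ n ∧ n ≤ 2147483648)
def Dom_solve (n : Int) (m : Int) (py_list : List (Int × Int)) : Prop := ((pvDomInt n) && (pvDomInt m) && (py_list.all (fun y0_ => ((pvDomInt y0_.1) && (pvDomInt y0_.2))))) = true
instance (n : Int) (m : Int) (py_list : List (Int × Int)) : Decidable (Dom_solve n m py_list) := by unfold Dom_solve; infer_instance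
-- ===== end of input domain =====

-- B replaces A's global stable (p,y) sort + counter array by direct per-element rank counting
-- (count of same-prefecture cities with earlier (year, index)); same results, similar cost (alternative).


-- shared by both ports: r = str(1000000 + p)[1:] + str(1000000 + k)[1:]  (the exact expression both Pythons contain)
def pvLabel (p : Int) (k : Int) : String :=
  String.ofList (PySem.List.slice (PySem.Int.toChars (1000000 + p)) (some 1) none ++
             PySem.List.slice (PySem.Int.toChars (1000000 + k)) (some 1) none)

-- ===== PORT A =====
-- loop body of A: c[p] += 1; r = label; res[i] = r   (c[p] with Python negative-index wraparound)
def pvStepA (st : List Int × List String) (x : Int × Int × Int) : List Int × List String :=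
  let idx := (if x.1 < 0 then x.1 + (st.1.length : Int) else x.1).toNat
  let cnt := st.1.getD idx 0 + 1
  (st.1.set idx cnt, st.2.set x.2.2.toNat (pvLabel x.1 cnt))

def solve (n : Int) (m : Int) (py_list : List (Int × Int)) : List String :=
  let pyi_list := (PySem.List.enumerate py_list).map (fun ip => (ip.2.1, ip.2.2, ip.1))
  let pyi_list_s := PySem.List.sorted2 pyi_list (fun x => x.1) (fun x => x.2.1)
  let c : List Int := List.replicate (n + 1).toNat 0
  let res : List String := List.replicate m.toNat "0"
  (pyi_list_s.foldl pvStepA (c, res)).2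

-- ===== PORT B =====
-- seq for city (p, y) at original index i: count of j with p_j = p and (y_j, j) ≤lex (y, i)
def pvSeqB (py_list : List (Int × Int)) (i p y : Int) : Int :=
  (PySem.List.enumerate py_list).foldl
    (fun acc jq =>
      if jq.2.1 == p && (decide (jq.2.2 < y) || (jq.2.2 == y && decide (jq.1 ≤ i))) then acc + 1 else acc)
    0

def solve_alt (n : Int) (m : Int) (py_list : List (Int × Int)) : List String :=
  (PySem.List.enumerate py_list).foldl
    (fun res ip => res.set ip.1.toNat (pvLabel ip.2.1 (pvSeqB py_list ip.1 ip.2.1 ip.2.2)))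
    (List.replicate m.toNat "0")

-- ===== PRECONDITION & SPEC =====
-- Pre_ excludes (a) inputs where A raises IndexError (a prefecture id outside [-(n+1), n], or more
-- cities than m), and (b) lists holding both a negative prefecture id p and its wrap partner p+n+1,
-- on which A returns but its counter c[p] wraps around (Python negative indexing) onto prefecture
-- p+n+1's slot, merging the two prefectures' numbering — an accident of A's list indexing; B numbers
-- each prefecture id separately there.
def Pre_solve (n : Int) (m : Int) (py_list : List (Int × Int)) : Prop :=
  (py_list = [] ∨ (py_list.length : Int) ≤ m) ∧ (∀ py ∈ py_list, -(n + 1) ≤ py.1 ∧ py.1 ≤ n) ∧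
    ¬ ∃ py ∈ py_list, py.1 < 0 ∧ ∃ py' ∈ py_list, py'.1 = py.1 + n + 1
instance (n : Int) (m : Int) (py_list : List (Int × Int)) : Decidable (Pre_solve n m py_list) := by
  unfold Pre_solve; infer_instance

def pvWitness_solve : Int × Int × (List (Int × Int)) := (2, 3, [(1, 5), (2, 3), (1, 5)])

def Spec_solve (n : Int) (m : Int) (py_list : List (Int × Int)) (out : List String) : Prop := out = solve_alt n m py_list
instance (n : Int) (m : Int) (py_list : List (Int × Int)) (out : List String) : Decidable (Spec_solve n m py_list out) := by unfold Spec_solve; infer_instance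

-- ===== CLAIM (what is proved, stated in full; the proofs are below) =====
def Claim_equal_solve : Prop := ∀ (n : Int) (m : Int) (py_list : List (Int × Int)), Dom_solve n m py_list → Pre_solve n m py_list → Spec_solve n m py_list (solve n m py_list)

-- ===== LEMMAS AND PROOFS =====

-- strict lexicographic-- strict lexicographic order on (p, y, i): the order in which A's stable sort emits the triples
def pvLex3 (a b : Int × Int × Int) : Bool :=
  decide (a.1 < b.1) || (a.1 == b.1 && (decide (a.2.1 < b.2.1) || (a.2.1 == b.2.1 && decide (a.2.2 < b.2.2))))

-- the comparison sorted2 pyi (·.1) (·.2.1) uses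
def pvBef (a b : Int × Int × Int) : Bool :=
  decide (a.1 < b.1) || (!decide (b.1 < a.1) && decide (a.2.1 < b.2.1))

theorem pvLex3_irrefl (a : Int × Int × Int) : pvLex3 a a = false := by
  simp [pvLex3]

theorem pvLex3_asymm {a b : Int × Int × Int} (h : pvLex3 a b = true) : pvLex3 b a = false := by
  simp [pvLex3] at *; omega

theorem pv_insertBy_pairwise (x : Int × Int × Int) (acc : List (Int × Int × Int))
    (hp : acc.Pairwise (fun a b => pvLex3 a b = true))
    (hi : ∀ a ∈ acc, a.2.2 < x.2.2) :
    (PySem.List.insertBy pvBef x acc).Pairwise (fun a b => pvLex3 a b = true) := by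
  induction acc with
  | nil => simp [PySem.List.insertBy]
  | cons y ys ih =>
    rcases hp with _ | ⟨hh, ht⟩
    rw [PySem.List.insertBy]
    by_cases hb : pvBef x y = true
    · rw [if_pos hb]
      refine List.Pairwise.cons ?_ (List.Pairwise.cons hh ht)
      intro b hb'
      rcases List.mem_cons.mp hb' with h | h
      · subst h; revert hb; simp [pvBef, pvLex3]; omega
      · have h1 : pvLex3 y b = true := hh b h
        revert h1; have := hb; revert this; simp [pvBef, pvLex3]; omega
    · rw [if_neg hb]
      refine List.Pairwise.cons ?_ (ih ht (fun a ha => hi a (List.mem_cons_of_mem _ ha)))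
      intro b hb'
      rcases (PySem.List.mem_insertBy _ _ _ _).mp hb' with h | h
      · subst b
        have hyx : y.2.2 < x.2.2 := hi y (List.mem_cons_self)
        revert hb; simp [pvBef, pvLex3]; omega
      · exact hh b h

theorem pv_foldl_insert_pairwise (xs : List (Int × Int × Int)) (acc : List (Int × Int × Int))
    (hp : acc.Pairwise (fun a b => pvLex3 a b = true))
    (hx : xs.Pairwise (fun a b => a.2.2 < b.2.2))
    (hax : ∀ a ∈ acc, ∀ y ∈ xs, a.2.2 < y.2.2) :
    (xs.foldl (fun acc x => PySem.List.insertBy pvBef x acc) acc).Pairwise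
      (fun a b => pvLex3 a b = true) := by
  induction xs generalizing acc with
  | nil => simpa using hp
  | cons x t ih =>
    rcases hx with _ | ⟨hh, ht⟩
    rw [List.foldl_cons]
    refine ih _ (pv_insertBy_pairwise x acc hp (fun a ha => hax a ha x List.mem_cons_self)) ht ?_
    intro a ha y hy
    rcases (PySem.List.mem_insertBy _ _ _ _).mp ha with h | h
    · subst a; exact hh y hy
    · exact hax a h y (List.mem_cons_of_mem _ hy)

theorem pv_enumerate_lb {α : Type} (xs : List α) (s : Int) :
    ∀ a ∈ PySem.List.enumerate xs s, s ≤ a.1 := by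
  induction xs generalizing s with
  | nil => simp [PySem.List.enumerate_nil]
  | cons h t ih =>
    intro a ha
    rw [PySem.List.enumerate_cons] at ha
    rcases List.mem_cons.mp ha with ha | ha
    · simp [ha]
    · have := ih (s + 1) a ha; omega

theorem pv_enumerate_pairwise {α : Type} (xs : List α) (s : Int) :
    (PySem.List.enumerate xs s).Pairwise (fun a b => a.1 < b.1) := by
  induction xs generalizing s with
  | nil => simp [PySem.List.enumerate_nil]
  | cons h t ih =>
    rw [PySem.List.enumerate_cons]
    exact List.Pairwise.cons (fun a ha => by have := pv_enumerate_lb t (s + 1) a ha; omega) (ih (s + 1))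

theorem pv_enumerate_mem_snd {α : Type} (xs : List α) (s : Int) :
    ∀ a ∈ PySem.List.enumerate xs s, a.2 ∈ xs := by
  induction xs generalizing s with
  | nil => simp [PySem.List.enumerate_nil]
  | cons h t ih =>
    intro a ha
    rw [PySem.List.enumerate_cons] at ha
    rcases List.mem_cons.mp ha with ha | ha
    · simp [ha]
    · exact List.mem_cons_of_mem _ (ih (s + 1) a ha)

-- injectivity on members of a list strictly increasing under a projection
theorem pv_proj_inj {α : Type} (f : α → Int) (l : List α)
    (hp : l.Pairwise (fun a b => f a < f b)) :
    ∀ a ∈ l, ∀ b ∈ l, f a = f b → a = b := by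
  induction l with
  | nil => simp
  | cons h t ih =>
    rcases hp with _ | ⟨hh, ht⟩
    intro a ha b hb hab
    rcases List.mem_cons.mp ha with ha | ha <;> rcases List.mem_cons.mp hb with hb | hb
    · rw [ha, hb]
    · exfalso; have := hh b hb; rw [ha] at hab; omega
    · exfalso; have := hh a ha; rw [hb] at hab; omega
    · exact ih ht a ha b hb hab

theorem pv_countP_split {α : Type} [BEq α] [LawfulBEq α] (p q : α → Bool) (a : α) :
    ∀ (l : List α), l.Nodup → a ∈ l → (∀ t ∈ l, q t = (p t || t == a)) → p a = false →
      l.countP q = l.countP p + 1 := by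
  intro l
  induction l with
  | nil => simp
  | cons b l' ih =>
    intro hnd hmem hq hpa
    rcases List.nodup_cons.mp hnd with ⟨hbl, hnd'⟩
    by_cases hab : a = b
    · subst hab
      have hq1 : q a = true := by rw [hq a List.mem_cons_self, hpa]; simp
      have hcongr : l'.countP q = l'.countP p := by
        apply List.countP_congr
        intro t ht
        have : (t == a) = false := by
          simp only [beq_eq_false_iff_ne]; intro he; subst he; exact hbl ht
        rw [hq t (List.mem_cons_of_mem _ ht), this]; simp
      simp [hq1, hpa, hcongr]
    · have hmem' : a ∈ l' := by
        rcases List.mem_cons.mp hmem with h | h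
        · exact absurd h hab
        · exact h
      have hqb : q b = p b := by
        have : (b == a) = false := by simp only [beq_eq_false_iff_ne]; intro he; exact hab he.symm
        rw [hq b List.mem_cons_self, this]; simp
      have := ih hnd' hmem' (fun t ht => hq t (List.mem_cons_of_mem _ ht)) hpa
      simp [List.countP_cons, hqb, this]
      by_cases hpb : p b = true <;> simp [hpb]

-- the counter slot A's c[p] += 1 touches (Python negative indexing into a list of length clen)
def pvSlot (clen : Nat) (p : Int) : Nat := (if p < 0 then p + (clen : Int) else p).toNat

-- A's loop, reformulated with the running prefix made explicit
def pvGo (clen : Nat) : List (Int × Int × Int) → List (Int × Int × Int) → List String → List String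
  | _, [], res => res
  | pre, x :: L, res =>
      pvGo clen (pre ++ [x]) L
        (res.set x.2.2.toNat
          (pvLabel x.1 ((pre.countP (fun t => pvSlot clen t.1 == pvSlot clen x.1) : Int) + 1)))

theorem pv_foldA (L : List (Int × Int × Int)) :
    ∀ (pre : List (Int × Int × Int)) (c : List Int) (res : List String),
      (∀ x ∈ L, -(c.length : Int) ≤ x.1 ∧ x.1 < (c.length : Int)) →
      (∀ q : Nat, q < c.length → c.getD q 0 = (pre.countP (fun t => pvSlot c.length t.1 == q) : Int)) →
      (L.foldl pvStepA (c, res)).2 = pvGo c.length pre L res := by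
  induction L with
  | nil => intro pre c res _ _; simp [pvGo]
  | cons x L ih =>
    intro pre c res hb hc
    obtain ⟨hx0, hxlt⟩ := hb x List.mem_cons_self
    have hslt : pvSlot c.length x.1 < c.length := by
      unfold pvSlot; split <;> omega
    have hidx : (if x.1 < 0 then x.1 + (c.length : Int) else x.1).toNat = pvSlot c.length x.1 := rfl
    rw [List.foldl_cons]
    show ((L.foldl pvStepA (c.set _ _, res.set _ _))).2 = _
    rw [pvGo, hidx]
    rw [ih (pre ++ [x]) _ _ ?_ ?_]
    · simp only [List.length_set]
      rw [hc _ hslt]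
    · intro z hz
      simpa only [List.length_set] using hb z (List.mem_cons_of_mem _ hz)
    · intro q hq
      rw [List.length_set] at hq
      simp only [List.length_set]
      by_cases hqx : q = pvSlot c.length x.1
      · rw [hqx]
        rw [List.getD_eq_getElem?_getD, List.getElem?_set_self (by omega), Option.getD_some]
        have h2 := hc _ hslt
        simp only [List.countP_append, List.countP_cons, List.countP_nil, beq_self_eq_true]
        push_cast
        omega
      · rw [List.getD_eq_getElem?_getD, List.getElem?_set_ne (by omega),
          ← List.getD_eq_getElem?_getD, hc q hq]
        rw [List.countP_append]
        have hx1 : (pvSlot c.length x.1 == q) = false := by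
          simp only [beq_eq_false_iff_ne]; omega
        simp [hx1]

theorem pv_go_spec (clen : Nat) (ss : List (Int × Int × Int))
    (hp : ss.Pairwise (fun a b => pvLex3 a b = true)) :
    ∀ (L pre : List (Int × Int × Int)) (res : List String), pre ++ L = ss →
      pvGo clen pre L res =
        L.foldl
          (fun res x =>
            res.set x.2.2.toNat
              (pvLabel x.1
                ((ss.countP (fun t => pvSlot clen t.1 == pvSlot clen x.1 && pvLex3 t x) : Int) + 1)))
          res := by
  intro L
  induction L with
  | nil => intro pre res _; simp [pvGo]
  | cons x L ih =>
    intro pre res hps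
    rw [pvGo, List.foldl_cons, ih (pre ++ [x]) _ (by rw [← hps]; simp)]
    have hcount : pre.countP (fun t => pvSlot clen t.1 == pvSlot clen x.1) =
        ss.countP (fun t => pvSlot clen t.1 == pvSlot clen x.1 && pvLex3 t x) := by
      subst hps
      rw [List.countP_append]
      have hpw := hp
      rw [List.pairwise_append] at hpw
      obtain ⟨hpre, hrest, hcross⟩ := hpw
      rcases hrest with _ | ⟨hxL, hL⟩
      have h1 : pre.countP (fun t => pvSlot clen t.1 == pvSlot clen x.1 && pvLex3 t x) =
          pre.countP (fun t => pvSlot clen t.1 == pvSlot clen x.1) := by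
        apply List.countP_congr
        intro t ht
        rw [hcross t ht x List.mem_cons_self]
        simp
      have h2 : (x :: L).countP (fun t => pvSlot clen t.1 == pvSlot clen x.1 && pvLex3 t x) = 0 := by
        rw [List.countP_eq_zero]
        intro t ht
        rcases List.mem_cons.mp ht with h | h
        · subst h; simp [pvLex3_irrefl]
        · simp [pvLex3_asymm (hxL t h)]
      rw [h1, h2]; omega
    rw [hcount]

theorem pv_mem_pyi (py_list : List (Int × Int)) (x : Int × Int × Int)
    (hx : x ∈ (PySem.List.enumerate py_list 0).map (fun ip => (ip.2.1, ip.2.2, ip.1))) :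
    (x.2.2, (x.1, x.2.1)) ∈ PySem.List.enumerate py_list 0 ∧ (x.1, x.2.1) ∈ py_list ∧ 0 ≤ x.2.2 := by
  obtain ⟨ip, hip, he⟩ := List.mem_map.mp hx
  have hipx : ip = (x.2.2, (x.1, x.2.1)) := by
    rcases ip with ⟨i, p, y⟩
    cases he
    rfl
  constructor
  · rw [← hipx]; exact hip
  constructor
  · have := pv_enumerate_mem_snd py_list 0 ip hip
    rw [hipx] at this; exact this
  · have := pv_enumerate_lb py_list 0 ip hip
    rw [hipx] at this; exact this

-- ===== VERDICT (by name: the statement is the Claim_ definition above) =====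
theorem solve_spec : Claim_equal_solve := by
  intro n m pyl _ hpre
  unfold Spec_solve
  obtain ⟨_, hpp, hD⟩ := hpre
  set pyi := (PySem.List.enumerate pyl 0).map (fun ip => (ip.2.1, ip.2.2, ip.1)) with hpyi
  set ss := PySem.List.sorted2 pyi (fun x => x.1) (fun x => x.2.1) with hss
  set clen := (n + 1).toNat with hclen
  have hperm : ss.Perm pyi := PySem.List.sorted2_perm pyi _ _ _
  have hepw := pv_enumerate_pairwise pyl 0
  have hinc : pyi.Pairwise (fun a b => a.2.2 < b.2.2) := by
    rw [hpyi, List.pairwise_map]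
    exact hepw
  have hssp : ss.Pairwise (fun a b => pvLex3 a b = true) := by
    have h0 : ss = pyi.foldl (fun acc x => PySem.List.insertBy pvBef x acc) [] := rfl
    rw [h0]
    exact pv_foldl_insert_pairwise pyi [] (by simp) hinc (by simp)
  have hnd : (PySem.List.enumerate pyl 0).Nodup :=
    hepw.imp (fun {a b} h => by intro he; rw [he] at h; omega)
  have hinj := pv_proj_inj (fun ip : Int × Int × Int => ip.1) _ hepw
  -- bounds for every prefecture id that occurs
  have hbnd : ∀ x ∈ pyi, -(n + 1) ≤ x.1 ∧ x.1 ≤ n := by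
    intro x hx
    exact hpp _ (pv_mem_pyi pyl x hx).2.1
  -- slots determine prefecture ids on the ids that occur, since D_ does not hold
  have hslotinj : ∀ x ∈ pyi, ∀ t ∈ pyi, pvSlot clen t.1 = pvSlot clen x.1 → t.1 = x.1 := by
    intro x hx t ht he
    obtain ⟨hx1, hx2⟩ := hbnd x hx
    obtain ⟨ht1, ht2⟩ := hbnd t ht
    by_contra hne
    unfold pvSlot at he
    have hn0 : 0 ≤ n := by omega
    apply hD
    rcases lt_or_ge t.1 0 with hneg | hpos
    · rw [if_pos hneg] at he
      have : ¬ x.1 < 0 := by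
        intro hxn
        rw [if_pos hxn] at he
        omega
      rw [if_neg this] at he
      exact ⟨(t.1, t.2.1), (pv_mem_pyi pyl t ht).2.1, by simpa using hneg,
        (x.1, x.2.1), (pv_mem_pyi pyl x hx).2.1, by simp; omega⟩
    · rw [if_neg (by omega)] at he
      have hxn : x.1 < 0 := by
        by_contra hxn
        rw [if_neg hxn] at he
        omega
      rw [if_pos hxn] at he
      exact ⟨(x.1, x.2.1), (pv_mem_pyi pyl x hx).2.1, by simpa using hxn,
        (t.1, t.2.1), (pv_mem_pyi pyl t ht).2.1, by simp; omega⟩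
  -- the counter value A uses equals B's directly-counted sequence number
  have hcnt : ∀ x ∈ ss,
      ((ss.countP (fun t => pvSlot clen t.1 == pvSlot clen x.1 && pvLex3 t x) : Int) + 1) =
        pvSeqB pyl x.2.2 x.1 x.2.1 := by
    intro x hx
    have hxp : x ∈ pyi := hperm.mem_iff.mp hx
    obtain ⟨hxe, hxl, hx0⟩ := pv_mem_pyi pyl x hxp
    have hslots : ss.countP (fun t => pvSlot clen t.1 == pvSlot clen x.1 && pvLex3 t x) =
        ss.countP (fun t => t.1 == x.1 && pvLex3 t x) := by
      apply List.countP_congr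
      intro t ht
      by_cases hteq : t.1 = x.1
      · simp [hteq]
      · have h1 : pvSlot clen t.1 ≠ pvSlot clen x.1 := by
          intro he
          exact hteq (hslotinj x hxp t (hperm.mem_iff.mp ht) he)
        have e1 : (pvSlot clen t.1 == pvSlot clen x.1) = false := by
          simp only [beq_eq_false_iff_ne]; exact h1
        have e2 : (t.1 == x.1) = false := by
          simp only [beq_eq_false_iff_ne]; exact hteq
        rw [e1, e2]
    rw [hslots]
    have hqlem : ∀ t ∈ PySem.List.enumerate pyl 0,
        (t.2.1 == x.1 && (decide (t.2.2 < x.2.1) || (t.2.2 == x.2.1 && decide (t.1 ≤ x.2.2)))) =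
          ((t.2.1 == x.1 && pvLex3 (t.2.1, t.2.2, t.1) x) || t == (x.2.2, (x.1, x.2.1))) := by
      intro t ht
      by_cases hta : t = (x.2.2, (x.1, x.2.1))
      · subst hta
        simp [pvLex3]
      · have htne : (t == (x.2.2, (x.1, x.2.1))) = false := by
          simp only [beq_eq_false_iff_ne]; exact hta
        have hfst : t.1 ≠ x.2.2 := by
          intro he
          exact hta (hinj t ht _ hxe he)
        simp only [htne, Bool.or_false]
        rcases t with ⟨j, qv, z⟩
        simp only at hfst
        rw [Bool.eq_iff_iff]
        simp [pvLex3]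
        omega
    have hpalem : (((x.2.2, (x.1, x.2.1)) : Int × Int × Int).2.1 == x.1 &&
        pvLex3 (((x.2.2, (x.1, x.2.1)) : Int × Int × Int).2.1,
          ((x.2.2, (x.1, x.2.1)) : Int × Int × Int).2.2,
          ((x.2.2, (x.1, x.2.1)) : Int × Int × Int).1) x) = false := by
      simp [pvLex3]
    have hsplit := pv_countP_split
        (fun jq : Int × Int × Int => jq.2.1 == x.1 && pvLex3 (jq.2.1, jq.2.2, jq.1) x)
        (fun jq : Int × Int × Int => jq.2.1 == x.1 &&
          (decide (jq.2.2 < x.2.1) || (jq.2.2 == x.2.1 && decide (jq.1 ≤ x.2.2))))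
        (x.2.2, (x.1, x.2.1)) (PySem.List.enumerate pyl 0) hnd hxe hqlem hpalem
    have h1 : ss.countP (fun t => t.1 == x.1 && pvLex3 t x) =
        (PySem.List.enumerate pyl 0).countP
          (fun jq => jq.2.1 == x.1 && pvLex3 (jq.2.1, jq.2.2, jq.1) x) := by
      rw [hperm.countP_eq, hpyi, List.countP_map]
      rfl
    simp only [pvSeqB, PySem.List.foldl_if_add_one]
    rw [h1, hsplit]
    push_cast
    omega
  -- A's fold, characterised
  have hA : solve n m pyl =
      ss.foldl
        (fun res x =>
          res.set x.2.2.toNat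
            (pvLabel x.1
              ((ss.countP (fun t => pvSlot clen t.1 == pvSlot clen x.1 && pvLex3 t x) : Int) + 1)))
        (List.replicate m.toNat "0") := by
    show (ss.foldl pvStepA (List.replicate (n + 1).toNat 0, List.replicate m.toNat "0")).2 = _
    rw [pv_foldA ss [] _ _ ?_ ?_]
    · rw [List.length_replicate]
      exact pv_go_spec clen ss hssp ss [] _ rfl
    · intro x hx
      have hxp : x ∈ pyi := hperm.mem_iff.mp hx
      obtain ⟨h0, hn⟩ := hbnd x hxp
      rw [List.length_replicate]
      omega
    · intro q hq
      simp
  -- B's fold, over the same triples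
  have hB : solve_alt n m pyl =
      pyi.foldl
        (fun res x => res.set x.2.2.toNat (pvLabel x.1 (pvSeqB pyl x.2.2 x.1 x.2.1)))
        (List.replicate m.toNat "0") := by
    rw [hpyi, List.foldl_map]
    rfl
  rw [hA, PySem.List.foldl_congr_mem _ _
      (fun res x => res.set x.2.2.toNat (pvLabel x.1 (pvSeqB pyl x.2.2 x.1 x.2.1))) _
      (fun res x hx => by rw [hcnt x hx]), hB]
  refine hperm.foldl_eq' ?_ _
  intro x hx y hy z
  by_cases he : x.2.2.toNat = y.2.2.toNat
  · have hx0 := (pv_mem_pyi pyl x (hperm.mem_iff.mp hx)).2.2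
    have hy0 := (pv_mem_pyi pyl y (hperm.mem_iff.mp hy)).2.2
    have hxy : x = y :=
      pv_proj_inj (fun t : Int × Int × Int => t.2.2) pyi hinc x (hperm.mem_iff.mp hx) y
        (hperm.mem_iff.mp hy) (by show x.2.2 = y.2.2; omega)
    rw [hxy]
  · exact List.set_comm _ _ he
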